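-- pv_equiv track=rewrite | github.com/dinhtranthi/aadl-architectural-models-dataset | scripts/aadl_pipeline/core.py | deduplicate_model_rows
-- ===== SOURCE A (Python) =====
-- def deduplicate_model_rows(rows: list[dict[str, object]]) -> list[dict[str, object]]:
--     sorted_rows = sorted(
--         rows,
--         key=lambda row: (str(row.get("repo_full_name", "")), str(row.get("source_file_path", ""))),
--     )
--     seen_hashes: set[str] = set()
--     deduplicated: list[dict[str, object]] = []
--     for row in sorted_rows:
--         sha256 = str(row["sha256"])
--         if sha256 in seen_hashes:
--             continue
--         seen_hashes.add(sha256)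
--         deduplicated.append(row)
--     return deduplicated
-- ===== SOURCE B (Python) =====
-- def deduplicate_model_rows(rows: list[dict[str, object]]) -> list[dict[str, object]]:
--     # One pass: for each sha256 keep the single row minimizing (repo, path, original index),
--     # then order the survivors by that same tuple (index sort + stable key sort).
--     best: dict[str, tuple[tuple[str, str, int], dict[str, object]]] = {}
--     for idx, row in enumerate(rows):
--         cand = (str(row.get("repo_full_name", "")), str(row.get("source_file_path", "")), idx)
--         sha256 = str(row["sha256"])
--         entry = best.get(sha256)
--         if entry is None or cand < entry[0]:
--             best[sha256] = (cand, row)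
--     survivors = sorted(best.values(), key=lambda e: e[0][2])
--     survivors = sorted(survivors, key=lambda e: (e[0][0], e[0][1]))
--     return [row for _, row in survivors]
-- ===== Notes on version B (the rewrite author's own statement) =====
-- stated objective: alternative
-- what changed: Instead of sorting all rows and linearly skipping already-seen hashes, B makes one reduce pass keeping per sha256 the single row minimizing (repo, path, original index) in a dict, then sorts only the survivors by that tuple.
import Mathlib
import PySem

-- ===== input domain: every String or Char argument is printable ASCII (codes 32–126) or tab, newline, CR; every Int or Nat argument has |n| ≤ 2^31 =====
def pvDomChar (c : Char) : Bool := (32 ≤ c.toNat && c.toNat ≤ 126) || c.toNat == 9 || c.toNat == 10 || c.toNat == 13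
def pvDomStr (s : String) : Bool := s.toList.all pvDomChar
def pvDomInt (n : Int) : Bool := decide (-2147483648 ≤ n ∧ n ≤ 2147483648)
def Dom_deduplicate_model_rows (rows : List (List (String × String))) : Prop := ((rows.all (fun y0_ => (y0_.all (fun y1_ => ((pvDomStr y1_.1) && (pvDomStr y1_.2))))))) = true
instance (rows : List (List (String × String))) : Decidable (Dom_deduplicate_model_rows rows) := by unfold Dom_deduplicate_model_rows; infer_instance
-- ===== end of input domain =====

-- B replaces sort-then-skip-seen-hashes by a one-pass per-hash minimum (by (repo, path, original index)) followed by a sort of the survivors only; proved to return the same list.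

-- shared row accessors (both Pythons read the row dict the same way; Pre_ guarantees "sha256" is present, so getD's default is never used)
def pvRepo (r : List (String × String)) : String := (PySem.Dict.mk r).getD "repo_full_name" ""
def pvPath (r : List (String × String)) : String := (PySem.Dict.mk r).getD "source_file_path" ""
def pvSha (r : List (String × String)) : String := (PySem.Dict.mk r).getD "sha256" ""

-- ===== PORT A =====
def deduplicate_model_rows (rows : List (List (String × String))) : List (List (String × String)) :=
  let sorted_rows := PySem.List.sorted2 rows pvRepo pvPath
  let res := sorted_rows.foldl
    (fun (st : PySem.Set String × List (List (String × String))) row =>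
      let sha256 := pvSha row
      if PySem.Set.contains st.1 sha256 then st
      else (PySem.Set.add st.1 sha256, st.2 ++ [row]))
    (PySem.Set.empty, [])
  res.2

-- ===== PORT B =====
-- Python tuple comparison cand < entry[0] on (str, str, int) triples
def pvLt3 (a b : String × String × Int) : Bool :=
  decide (a.1 < b.1) || (a.1 == b.1 && (decide (a.2.1 < b.2.1) || (a.2.1 == b.2.1 && decide (a.2.2 < b.2.2))))

def deduplicate_model_rows_alt (rows : List (List (String × String))) : List (List (String × String)) :=
  let best := (PySem.List.enumerate rows).foldl
    (fun (d : PySem.Dict String ((String × String × Int) × List (String × String))) p =>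
      let cand := (pvRepo p.2, pvPath p.2, p.1)
      let sha256 := pvSha p.2
      match d.get? sha256 with
      | none => d.insert sha256 (cand, p.2)
      | some e => if pvLt3 cand e.1 then d.insert sha256 (cand, p.2) else d)
    PySem.Dict.empty
  let s1 := PySem.List.sorted best.values (fun e => e.1.2.2)
  let survivors := PySem.List.sorted2 s1 (fun e => e.1.1) (fun e => e.1.2.1)
  survivors.map (fun e => e.2)

-- ===== PRECONDITION & SPEC =====
-- Pre_ excludes rows without a "sha256" key (Python A raises KeyError there) and rows whose
-- association list repeats a key (no Python dict corresponds to such an input).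
def Pre_deduplicate_model_rows (rows : List (List (String × String))) : Prop :=
  ∀ r ∈ rows, (PySem.Dict.mk r).contains "sha256" = true ∧ (r.map (·.1)).Nodup
instance (rows : List (List (String × String))) : Decidable (Pre_deduplicate_model_rows rows) := by unfold Pre_deduplicate_model_rows; infer_instance
def pvWitness_deduplicate_model_rows : (List (List (String × String))) :=
  [[("sha256", "a"), ("repo_full_name", "r")], [("sha256", "a")]]

def Spec_deduplicate_model_rows (rows : List (List (String × String))) (out : List (List (String × String))) : Prop := out = deduplicate_model_rows_alt rows
instance (rows : List (List (String × String))) (out : List (List (String × String))) : Decidable (Spec_deduplicate_model_rows rows out) := by unfold Spec_deduplicate_model_rows; infer_instance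

-- ===== CLAIM (what is proved, stated in full; the proofs are below) =====
def Claim_equal_deduplicate_model_rows : Prop := ∀ (rows : List (List (String × String))), Dom_deduplicate_model_rows rows → Pre_deduplicate_model_rows rows → Spec_deduplicate_model_rows rows (deduplicate_model_rows rows)

-- ===== LEMMAS AND PROOFS =====

-- abbreviations for the proof (an "entry" is what B stores per hash: the (repo, path, index) triple plus the row)
abbrev PvEnt : Type := (String × String × Int) × List (String × String)
def hhE (e : PvEnt) : String := pvSha e.2
def fE (e : PvEnt) : String ×ₗ String := toLex (e.1.1, e.1.2.1)
def gE (e : PvEnt) : Int := e.1.2.2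
def muE (e : PvEnt) : (String ×ₗ String) ×ₗ Int := toLex (fE e, gE e)
def entP (p : Int × List (String × String)) : PvEnt := ((pvRepo p.2, pvPath p.2, p.1), p.2)

theorem pv_insertBy_congr {α : Type} (b1 b2 : α → α → Bool) (x : α) (acc : List α)
    (h : ∀ y ∈ acc, b1 x y = b2 x y) :
    PySem.List.insertBy b1 x acc = PySem.List.insertBy b2 x acc := by
  induction acc with
  | nil => rfl
  | cons y ys ih =>
    simp only [PySem.List.insertBy]
    rw [h y (by simp)]
    split
    · rfl
    · rw [ih (fun z hz => h z (by simp [hz]))]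

theorem pv_foldl_insertBy_congr {α : Type} (P : α → Prop) (b1 b2 : α → α → Bool)
    (h : ∀ a b, P a → P b → b1 a b = b2 a b) :
    ∀ (xs : List α) (acc : List α), (∀ x ∈ xs, P x) → (∀ y ∈ acc, P y) →
      xs.foldl (fun acc x => PySem.List.insertBy b1 x acc) acc
        = xs.foldl (fun acc x => PySem.List.insertBy b2 x acc) acc := by
  intro xs
  induction xs with
  | nil => intro acc _ _; rfl
  | cons x t ih =>
    intro acc hxs hacc
    simp only [List.foldl_cons]
    rw [pv_insertBy_congr b1 b2 x acc (fun y hy => h x y (hxs x (by simp)) (hacc y hy))]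
    exact ih _ (fun z hz => hxs z (by simp [hz]))
      (fun y hy => by
        rcases (PySem.List.mem_insertBy b2 x y acc).1 hy with h1 | h2
        · exact h1 ▸ hxs x (by simp)
        · exact hacc y h2)

theorem pv_sorted_congr_mem {α κ : Type} [LinearOrder κ] (xs : List α) (k1 k2 : α → κ)
    (h : ∀ a ∈ xs, k1 a = k2 a) :
    PySem.List.sorted xs k1 = PySem.List.sorted xs k2 := by
  simp only [PySem.List.sorted, Bool.false_eq_true, if_false]
  exact pv_foldl_insertBy_congr (· ∈ xs) _ _
    (fun a b ha hb => by simp only [h a ha, h b hb]) xs [] (fun x hx => hx) (by simp)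


-- sorted2's boolean "before" is exactly the lexicographic strict order on the key pair
theorem pv_sorted2_eq_sorted_lex {α κ₁ κ₂ : Type} [LinearOrder κ₁] [LinearOrder κ₂]
    (xs : List α) (k1 : α → κ₁) (k2 : α → κ₂) :
    PySem.List.sorted2 xs k1 k2 = PySem.List.sorted xs (fun x => toLex (k1 x, k2 x)) := by
  simp only [PySem.List.sorted2, PySem.List.sorted, Bool.false_eq_true, if_false]
  congr 1
  funext acc x
  congr 1
  funext a b
  rcases lt_trichotomy (k1 a) (k1 b) with h | h | h
  · simp [Prod.Lex.lt_iff, h]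
  · simp [Prod.Lex.lt_iff, h, lt_irrefl]
  · simp [Prod.Lex.lt_iff, h, not_lt_of_gt h, h.ne', lt_asymm h]



theorem pv_insertBy_map {α β : Type} (b : β → β → Bool) (f : α → β) (x : α) (acc : List α) :
    PySem.List.insertBy b (f x) (acc.map f) = (PySem.List.insertBy (fun a c => b (f a) (f c)) x acc).map f := by
  induction acc with
  | nil => rfl
  | cons y ys ih =>
    simp only [List.map_cons, PySem.List.insertBy]
    split
    · simp
    · simp [ih]

theorem pv_sorted_map {α β κ : Type} [LinearOrder κ] (xs : List α) (f : α → β) (key : β → κ) :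
    PySem.List.sorted (xs.map f) key = (PySem.List.sorted xs (fun a => key (f a))).map f := by
  simp only [PySem.List.sorted, Bool.false_eq_true, if_false]
  rw [List.foldl_map]
  have : ∀ (l : List α) (acc : List α),
      l.foldl (fun acc x => PySem.List.insertBy (fun a b => decide (key a < key b)) (f x) acc) (acc.map f)
        = (l.foldl (fun acc x => PySem.List.insertBy (fun a b => decide (key (f a) < key (f b))) x acc) acc).map f := by
    intro l
    induction l with
    | nil => intro acc; rfl
    | cons x t ih => intro acc; simp only [List.foldl_cons, pv_insertBy_map]; exact ih _
  simpa using this xs []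

-- stability: sorting by `f` a list whose elements are strictly increasing under `g`
-- is the same as sorting by the lexicographic key (f, g)
theorem pv_sorted_stable {α K J : Type} [LinearOrder K] [LinearOrder J]
    (xs : List α) (f : α → K) (g : α → J)
    (hx : xs.Pairwise (fun a b => g a < g b)) :
    PySem.List.sorted xs f = PySem.List.sorted xs (fun x => toLex (f x, g x)) := by
  simp only [PySem.List.sorted, Bool.false_eq_true, if_false]
  have main : ∀ (l : List α) (acc : List α), l.Pairwise (fun a b => g a < g b) →
      (∀ y ∈ acc, ∀ x ∈ l, g y < g x) →
      l.foldl (fun acc x => PySem.List.insertBy (fun a b => decide (f a < f b)) x acc) acc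
        = l.foldl (fun acc x => PySem.List.insertBy (fun a b => decide (toLex (f a, g a) < toLex (f b, g b))) x acc) acc := by
    intro l
    induction l with
    | nil => intro acc _ _; rfl
    | cons x t ih =>
      intro acc hp hacc
      simp only [List.foldl_cons]
      have hins : PySem.List.insertBy (fun a b => decide (f a < f b)) x acc
          = PySem.List.insertBy (fun a b => decide (toLex (f a, g a) < toLex (f b, g b))) x acc := by
        apply pv_insertBy_congr
        intro y hy
        have hgy : g y < g x := hacc y hy x (by simp)
        simp only [decide_eq_decide, Prod.Lex.lt_iff]
        constructor
        · intro h; exact Or.inl h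
        · rintro (h | ⟨_, h⟩)
          · exact h
          · exact absurd h (not_lt_of_gt hgy)
      rw [hins]
      apply ih _ (List.Pairwise.of_cons hp)
      intro y hy x' hx'
      rcases (PySem.List.mem_insertBy _ x y acc).1 hy with h1 | h2
      · subst h1; exact (List.pairwise_cons.1 hp).1 x' hx'
      · exact hacc y h2 x' (by simp [hx'])
  exact main xs [] hx (by simp)

theorem pv_pairwise_lt_of_le_nodup {α κ : Type} [LinearOrder κ] (l : List α) (key : α → κ)
    (hle : l.Pairwise (fun a b => key a ≤ key b)) (hnd : (l.map key).Nodup) :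
    l.Pairwise (fun a b => key a < key b) := by
  induction l with
  | nil => exact List.Pairwise.nil
  | cons x t ih =>
    simp only [List.map_cons, List.nodup_cons, List.mem_map] at hnd
    refine List.pairwise_cons.2 ⟨fun y hy => ?_, ih (List.Pairwise.of_cons hle) hnd.2⟩
    have h1 := (List.pairwise_cons.1 hle).1 y hy
    have h2 : key x ≠ key y := fun h => hnd.1 ⟨y, hy, h.symm⟩
    exact lt_of_le_of_ne h1 h2

theorem pv_sorted_pairwise_lt {α κ : Type} [LinearOrder κ] (xs : List α) (key : α → κ)
    (hnd : (xs.map key).Nodup) :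
    (PySem.List.sorted xs key).Pairwise (fun a b => key a < key b) := by
  apply pv_pairwise_lt_of_le_nodup _ _ (PySem.List.sorted_pairwise xs key)
  exact (((PySem.List.sorted_perm xs key false).map key).nodup_iff).2 hnd


theorem pv_enum_map_snd {α : Type} (xs : List α) (s : Int) :
    (PySem.List.enumerate xs s).map (·.2) = xs := by
  induction xs generalizing s with
  | nil => rfl
  | cons x t ih => simp [PySem.List.enumerate, ih]

theorem pv_enum_fst_ge {α : Type} (xs : List α) (s : Int) :
    ∀ p ∈ PySem.List.enumerate xs s, s ≤ p.1 := by
  induction xs generalizing s with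
  | nil => simp [PySem.List.enumerate]
  | cons x t ih =>
    intro p hp
    simp only [PySem.List.enumerate, List.mem_cons] at hp
    rcases hp with h | h
    · subst h; simp
    · have := ih (s + 1) p h; omega

theorem pv_enum_pairwise {α : Type} (xs : List α) (s : Int) :
    (PySem.List.enumerate xs s).Pairwise (fun a b => a.1 < b.1) := by
  induction xs generalizing s with
  | nil => exact List.Pairwise.nil
  | cons x t ih =>
    simp only [PySem.List.enumerate]
    refine List.pairwise_cons.2 ⟨fun q hq => ?_, ih (s + 1)⟩
    have := pv_enum_fst_ge t (s + 1) q hq; simp; omega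

-- keep-first-occurrence-per-hash, on entry lists
def dkE (seen : List String) : List PvEnt → List PvEnt
  | [] => []
  | e :: t => if hhE e ∈ seen then dkE seen t else e :: dkE (hhE e :: seen) t

def dkR (seen : List String) : List (List (String × String)) → List (List (String × String))
  | [] => []
  | r :: t => if pvSha r ∈ seen then dkR seen t else r :: dkR (pvSha r :: seen) t

theorem pv_dkR_congr (seen1 seen2 : List String) (h : ∀ s, s ∈ seen1 ↔ s ∈ seen2) :
    ∀ l, dkR seen1 l = dkR seen2 l := by
  intro l
  induction l generalizing seen1 seen2 with
  | nil => rfl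
  | cons r t ih =>
    simp only [dkR]
    by_cases hm : pvSha r ∈ seen1
    · rw [if_pos hm, if_pos ((h _).1 hm)]; exact ih _ _ h
    · rw [if_neg hm, if_neg (fun hc => hm ((h _).2 hc))]
      exact congrArg _ (ih _ _ (fun s => by simp [h s]))

-- A's fold with a seen-Set is the keep-first recursion
theorem pv_foldA_eq (l : List (List (String × String))) :
    ∀ (seen : PySem.Set String) (acc : List (List (String × String))),
    (l.foldl
      (fun (st : PySem.Set String × List (List (String × String))) row =>
        let sha256 := pvSha row
        if PySem.Set.contains st.1 sha256 then st
        else (PySem.Set.add st.1 sha256, st.2 ++ [row]))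
      (seen, acc)).2 = acc ++ dkR seen l := by
  induction l with
  | nil => intro seen acc; simp [dkR]
  | cons r t ih =>
    intro seen acc
    simp only [List.foldl_cons, dkR]
    by_cases hm : pvSha r ∈ seen
    · rw [if_pos hm]
      have : PySem.Set.contains seen (pvSha r) = true := by
        simp [PySem.Set.contains, List.contains_eq_mem, hm]
      simp only [this, if_pos rfl]
      exact ih seen acc
    · have hc : PySem.Set.contains seen (pvSha r) = false := by
        simp [PySem.Set.contains, List.contains_eq_mem, hm]
      rw [if_neg hm]
      simp only [hc, Bool.false_eq_true, if_false]
      rw [ih _ _]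
      have : PySem.Set.add seen (pvSha r) = seen ++ [pvSha r] := by
        simp [PySem.Set.add, PySem.Set.contains, List.contains_eq_mem, hm]
      have hcg : dkR (seen ++ [pvSha r]) t = dkR (pvSha r :: seen) t :=
        pv_dkR_congr _ _ (fun s => by simp only [List.mem_append, List.mem_cons, List.not_mem_nil, or_false]; exact or_comm) t
      rw [this, hcg]
      simp

theorem pv_dkR_map (seen : List String) (l : List PvEnt) :
    dkR seen (l.map (·.2)) = (dkE seen l).map (·.2) := by
  induction l generalizing seen with
  | nil => rfl
  | cons e t ih =>
    simp only [List.map_cons, dkR, dkE, hhE]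
    by_cases hm : pvSha e.2 ∈ seen
    · rw [if_pos hm, if_pos hm, ih]
    · rw [if_neg hm, if_neg hm, List.map_cons, ih]

theorem pv_dkE_sublist (seen : List String) (l : List PvEnt) : (dkE seen l).Sublist l := by
  induction l generalizing seen with
  | nil => exact List.Sublist.refl _
  | cons e t ih =>
    simp only [dkE]
    split
    · exact (ih seen).cons e
    · exact (ih _).cons₂ e

theorem pv_mem_dkE (l : List PvEnt) : ∀ (seen : List String),
    l.Pairwise (fun a b => muE a < muE b) → ∀ x,
    (x ∈ dkE seen l ↔ x ∈ l ∧ hhE x ∉ seen ∧ ∀ y ∈ l, hhE y = hhE x → muE x ≤ muE y) := by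
  induction l with
  | nil => intro seen _ x; simp [dkE]
  | cons e t ih =>
    intro seen hp x
    have hhead := (List.pairwise_cons.1 hp).1
    have htail := (List.pairwise_cons.1 hp).2
    simp only [dkE]
    by_cases hm : hhE e ∈ seen
    · rw [if_pos hm, ih seen htail x]
      constructor
      · rintro ⟨hx, hns, hmin⟩
        refine ⟨List.mem_cons_of_mem _ hx, hns, fun y hy hh => ?_⟩
        rcases List.mem_cons.1 hy with rfl | hy'
        · exact absurd (hh ▸ hm) hns
        · exact hmin y hy' hh
      · rintro ⟨hx, hns, hmin⟩
        rcases List.mem_cons.1 hx with rfl | hx'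
        · exact absurd hm hns
        · exact ⟨hx', hns, fun y hy hh => hmin y (List.mem_cons_of_mem _ hy) hh⟩
    · rw [if_neg hm]
      by_cases hxe : x = e
      · subst hxe
        simp only [List.mem_cons, true_or, true_iff]
        refine ⟨trivial, hm, fun y hy hh => ?_⟩
        rcases hy with rfl | hy'
        · exact le_refl _
        · exact le_of_lt (hhead y hy')
      · simp only [List.mem_cons, hxe, false_or]
        rw [ih _ htail x]
        constructor
        · rintro ⟨hx, hns, hmin⟩
          have hne : hhE x ≠ hhE e := fun h => hns (h ▸ List.mem_cons_self)
          refine ⟨hx, fun h => hns (List.mem_cons_of_mem _ h), fun y hy hh => ?_⟩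
          rcases hy with rfl | hy'
          · exact absurd hh (fun h => hne h.symm)
          · exact hmin y hy' hh
        · rintro ⟨hx, hns, hmin⟩
          have hne : hhE x ≠ hhE e := by
            intro h
            have := hmin e (Or.inl rfl) h.symm
            exact absurd (hhead x hx) (not_lt.2 this)
          refine ⟨hx, ?_, fun y hy hh => hmin y (Or.inr hy) hh⟩
          intro h
          rcases List.mem_cons.1 h with h' | h'
          · exact hne h'
          · exact hns h'


def muT (t : String × String × Int) : (String ×ₗ String) ×ₗ Int := toLex (toLex (t.1, t.2.1), t.2.2)

theorem pv_lt3_iff (a b : String × String × Int) : pvLt3 a b = true ↔ muT a < muT b := by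
  simp only [pvLt3, muT, Bool.or_eq_true, Bool.and_eq_true, decide_eq_true_eq, beq_iff_eq,
    Prod.Lex.lt_iff]
  constructor
  · rintro (h | ⟨h1, h2 | ⟨h2, h3⟩⟩)
    · exact Or.inl (Or.inl h)
    · exact Or.inl (Or.inr ⟨h1, h2⟩)
    · exact Or.inr ⟨by simp [Prod.ext_iff, h1, h2], h3⟩
  · rintro ((h | ⟨h1, h2⟩) | ⟨h, h3⟩)
    · exact Or.inl h
    · exact Or.inr ⟨h1, Or.inl h2⟩
    · have h' : (a.1, a.2.1) = (b.1, b.2.1) := congrArg ofLex h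
      simp only [Prod.mk.injEq] at h'
      exact Or.inr ⟨h'.1, Or.inr ⟨h'.2, h3⟩⟩

def bstep (d : PySem.Dict String PvEnt) (p : Int × List (String × String)) : PySem.Dict String PvEnt :=
  let cand := (pvRepo p.2, pvPath p.2, p.1)
  let sha256 := pvSha p.2
  match d.get? sha256 with
  | none => d.insert sha256 (cand, p.2)
  | some e => if pvLt3 cand e.1 then d.insert sha256 (cand, p.2) else d

def InvB (d : PySem.Dict String PvEnt) (P : List (Int × List (String × String))) : Prop :=
  (∀ g e, d.get? g = some e →
    (∃ p ∈ P, entP p = e) ∧ hhE e = g ∧ (∀ q ∈ P, pvSha q.2 = g → muE e ≤ muE (entP q))) ∧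
  (∀ p ∈ P, ∃ e, d.get? (pvSha p.2) = some e) ∧
  d.keys.Nodup

theorem pv_muE_eq_muT (e : PvEnt) : muE e = muT e.1 := rfl

theorem pv_bstep_inv (d : PySem.Dict String PvEnt) (P : List (Int × List (String × String)))
    (p : Int × List (String × String)) (h : InvB d P) : InvB (bstep d p) (P ++ [p]) := by
  obtain ⟨ha, hb, hc⟩ := h
  have hins : ∀ e₀ : PvEnt, hhE e₀ = pvSha p.2 →
      (∃ q ∈ P ++ [p], entP q = e₀) →
      (∀ q ∈ P ++ [p], pvSha q.2 = pvSha p.2 → muE e₀ ≤ muE (entP q)) →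
      InvB (d.insert (pvSha p.2) e₀) (P ++ [p]) := by
    intro e₀ hh0 hex0 hmin0
    refine ⟨?_, ?_, PySem.Dict.nodup_keys_insert d _ _ hc⟩
    · intro g e hge
      rw [PySem.Dict.get?_insert] at hge
      by_cases hg : g = pvSha p.2
      · rw [if_pos hg] at hge
        obtain rfl := Option.some.inj hge
        exact ⟨hex0, hg ▸ hh0, fun q hq hqg => hmin0 q hq (hg ▸ hqg)⟩
      · rw [if_neg hg] at hge
        obtain ⟨hex, hhe, hmin⟩ := ha g e hge
        refine ⟨⟨hex.choose, List.mem_append_left _ hex.choose_spec.1, hex.choose_spec.2⟩, hhe, ?_⟩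
        intro q hq hqg
        rcases List.mem_append.1 hq with hq' | hq'
        · exact hmin q hq' hqg
        · obtain rfl := List.mem_singleton.1 hq'
          exact absurd hqg.symm hg
    · intro q hq
      rcases List.mem_append.1 hq with hq' | hq'
      · by_cases hg : pvSha q.2 = pvSha p.2
        · exact ⟨e₀, by rw [PySem.Dict.get?_insert, if_pos hg]⟩
        · obtain ⟨e, he⟩ := hb q hq'
          exact ⟨e, by rw [PySem.Dict.get?_insert, if_neg hg]; exact he⟩
      · obtain rfl := List.mem_singleton.1 hq'
        exact ⟨e₀, by rw [PySem.Dict.get?_insert, if_pos rfl]⟩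
  show InvB (bstep d p) (P ++ [p])
  unfold bstep
  simp only []
  cases hget : d.get? (pvSha p.2) with
  | none =>
    refine hins (entP p) rfl ⟨p, List.mem_append_right _ (List.mem_singleton.2 rfl), rfl⟩ ?_
    intro q hq hqg
    rcases List.mem_append.1 hq with hq' | hq'
    · obtain ⟨e, he⟩ := hb q hq'
      rw [hqg, hget] at he
      exact absurd he (by simp)
    · obtain rfl := List.mem_singleton.1 hq'
      exact le_refl _
  | some e =>
    show InvB (if pvLt3 (pvRepo p.2, pvPath p.2, p.1) e.1 = true
        then d.insert (pvSha p.2) ((pvRepo p.2, pvPath p.2, p.1), p.2) else d) (P ++ [p])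
    by_cases hlt : pvLt3 (pvRepo p.2, pvPath p.2, p.1) e.1 = true
    · rw [if_pos hlt]
      refine hins (entP p) rfl ⟨p, List.mem_append_right _ (List.mem_singleton.2 rfl), rfl⟩ ?_
      have hpe : muE (entP p) < muE e := by
        rw [pv_muE_eq_muT, pv_muE_eq_muT]
        exact (pv_lt3_iff _ _).1 hlt
      intro q hq hqg
      rcases List.mem_append.1 hq with hq' | hq'
      · exact le_of_lt (lt_of_lt_of_le hpe ((ha _ e hget).2.2 q hq' hqg))
      · obtain rfl := List.mem_singleton.1 hq'
        exact le_refl _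
    · rw [if_neg hlt]
      have hep : muE e ≤ muE (entP p) := by
        rw [pv_muE_eq_muT, pv_muE_eq_muT]
        exact not_lt.1 (fun hlt' => hlt ((pv_lt3_iff _ _).2 hlt'))
      refine ⟨?_, ?_, hc⟩
      · intro g e' hge
        obtain ⟨hex, hhe, hmin⟩ := ha g e' hge
        refine ⟨⟨hex.choose, List.mem_append_left _ hex.choose_spec.1, hex.choose_spec.2⟩, hhe, ?_⟩
        intro q hq hqg
        rcases List.mem_append.1 hq with hq' | hq'
        · exact hmin q hq' hqg
        · obtain rfl := List.mem_singleton.1 hq'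
          rw [hqg] at hget
          rw [hget] at hge
          obtain rfl := Option.some.inj hge
          exact hep
      · intro q hq
        rcases List.mem_append.1 hq with hq' | hq'
        · exact hb q hq'
        · obtain rfl := List.mem_singleton.1 hq'
          exact ⟨e, hget⟩

theorem pv_fold_inv (S : List (Int × List (String × String))) :
    ∀ (P : List (Int × List (String × String))) (d : PySem.Dict String PvEnt),
    InvB d P → InvB (S.foldl bstep d) (P ++ S) := by
  induction S with
  | nil => intro P d h; simpa using h
  | cons p t ih =>
    intro P d h
    have := ih (P ++ [p]) (bstep d p) (pv_bstep_inv d P p h)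
    simpa using this

theorem pv_inv_empty : InvB PySem.Dict.empty [] := by
  refine ⟨?_, ?_, PySem.Dict.nodup_keys_empty⟩
  · intro g e hge; rw [PySem.Dict.get?_empty] at hge; exact absurd hge (by simp)
  · intro p hp; exact absurd hp (by simp)

-- per-fixed-rows abbreviations
def pvE (rows : List (List (String × String))) : List (Int × List (String × String)) :=
  PySem.List.enumerate rows
def pvT (rows : List (List (String × String))) : List PvEnt := (pvE rows).map entP
def pvSS (rows : List (List (String × String))) : List PvEnt := PySem.List.sorted (pvT rows) muE

theorem pv_T_pairwise_g (rows : List (List (String × String))) :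
    (pvT rows).Pairwise (fun a b => gE a < gE b) := by
  rw [pvT, List.pairwise_map]
  exact pv_enum_pairwise rows 0

theorem pv_mu_ne_of_g_lt {a b : PvEnt} (h : gE a < gE b) : muE a ≠ muE b := by
  intro he
  have : gE a = gE b := congrArg (fun x => (ofLex x).2) he
  omega

theorem pv_T_map_mu_nodup (rows : List (List (String × String))) :
    ((pvT rows).map muE).Nodup := by
  simp only [List.Nodup, List.pairwise_map]
  exact (pv_T_pairwise_g rows).imp (fun h => pv_mu_ne_of_g_lt h)

theorem pv_T_inj (rows : List (List (String × String))) :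
    ∀ a ∈ pvT rows, ∀ b ∈ pvT rows, muE a = muE b → a = b :=
  fun a ha b hb h => List.inj_on_of_nodup_map (pv_T_map_mu_nodup rows) ha hb h

theorem pv_SS_pairwise (rows : List (List (String × String))) :
    (pvSS rows).Pairwise (fun a b => muE a < muE b) :=
  pv_sorted_pairwise_lt _ _ (pv_T_map_mu_nodup rows)

-- the A side: A rows = (dkE [] (pvSS rows)).map (·.2)
theorem pv_A_eq (rows : List (List (String × String))) :
    deduplicate_model_rows rows = (dkE [] (pvSS rows)).map (·.2) := by
  show (List.foldl _ (PySem.Set.empty, []) (PySem.List.sorted2 rows pvRepo pvPath)).2 = _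
  rw [pv_foldA_eq]
  have h1 : PySem.List.sorted2 rows pvRepo pvPath
      = PySem.List.sorted rows (fun r => toLex (pvRepo r, pvPath r)) :=
    pv_sorted2_eq_sorted_lex rows pvRepo pvPath
  have h2 : rows = (pvT rows).map (·.2) := by
    rw [pvT, List.map_map]
    exact (pv_enum_map_snd rows 0).symm
  have h3 : PySem.List.sorted ((pvT rows).map (·.2)) (fun r => toLex (pvRepo r, pvPath r))
      = (PySem.List.sorted (pvT rows) (fun e => toLex (pvRepo e.2, pvPath e.2))).map (·.2) :=
    pv_sorted_map _ _ _
  have h4 : PySem.List.sorted (pvT rows) (fun e => toLex (pvRepo e.2, pvPath e.2))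
      = PySem.List.sorted (pvT rows) fE := by
    apply pv_sorted_congr_mem
    intro a ha
    rw [pvT, List.mem_map] at ha
    obtain ⟨p, _, rfl⟩ := ha
    rfl
  have h5 : PySem.List.sorted (pvT rows) fE = pvSS rows :=
    pv_sorted_stable _ fE gE (pv_T_pairwise_g rows)
  rw [h1]
  conv_lhs => rw [h2]
  rw [h3, h4, h5, pv_dkR_map]
  simp [PySem.Set.empty]

def pvBest (rows : List (List (String × String))) : PySem.Dict String PvEnt :=
  (pvE rows).foldl bstep PySem.Dict.empty

theorem pv_best_inv (rows : List (List (String × String))) : InvB (pvBest rows) (pvE rows) := by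
  have := pv_fold_inv (pvE rows) [] PySem.Dict.empty pv_inv_empty
  simpa [pvBest] using this

theorem pv_mem_values_iff (rows : List (List (String × String))) (e : PvEnt) :
    e ∈ (pvBest rows).values ↔
      e ∈ pvT rows ∧ ∀ y ∈ pvT rows, hhE y = hhE e → muE e ≤ muE y := by
  obtain ⟨ha, hb, hc⟩ := pv_best_inv rows
  constructor
  · intro hv
    obtain ⟨pr, hpr, hpre⟩ := List.mem_map.1 hv
    obtain ⟨g, e'⟩ := pr
    obtain rfl : e = e' := hpre.symm
    have hget := PySem.Dict.get?_of_mem_items _ hpr hc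
    obtain ⟨⟨p, hp, hpe⟩, hh, hmin⟩ := ha g e hget
    refine ⟨List.mem_map.2 ⟨p, hp, hpe⟩, ?_⟩
    intro y hy hhy
    obtain ⟨q, hq, rfl⟩ := List.mem_map.1 hy
    exact hmin q hq (hhy.trans hh)
  · rintro ⟨he, hmin⟩
    obtain ⟨p, hp, rfl⟩ := List.mem_map.1 he
    obtain ⟨e', hget⟩ := hb p hp
    obtain ⟨he', hh', hmin'⟩ := ha _ e' hget
    have h1 : muE (entP p) ≤ muE e' := by
      apply hmin e' _ hh'
      obtain ⟨q, hq, hqe⟩ := he'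
      exact List.mem_map.2 ⟨q, hq, hqe⟩
    have h2 : muE e' ≤ muE (entP p) := hmin' p hp rfl
    have hee : e' = entP p := by
      apply pv_T_inj rows e' _ (entP p) (List.mem_map.2 ⟨p, hp, rfl⟩) (le_antisymm h2 h1)
      obtain ⟨q, hq, hqe⟩ := he'
      exact List.mem_map.2 ⟨q, hq, hqe⟩
    rw [hee] at hget
    exact List.mem_map.2 ⟨_, PySem.Dict.mem_items_of_get?_eq_some _ hget, rfl⟩

theorem pv_values_nodup (rows : List (List (String × String))) : (pvBest rows).values.Nodup := by
  obtain ⟨ha, _, hc⟩ := pv_best_inv rows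
  have hitems : (pvBest rows).items.Nodup := List.Nodup.of_map _ hc
  apply List.Nodup.map_on _ hitems
  intro x hx y hy hxy
  obtain ⟨gx, ex⟩ := x
  obtain ⟨gy, ey⟩ := y
  obtain rfl : ex = ey := hxy
  have h1 := (ha gx ex (PySem.Dict.get?_of_mem_items _ hx hc)).2.1
  have h2 := (ha gy ex (PySem.Dict.get?_of_mem_items _ hy hc)).2.1
  rw [← h1, ← h2]

theorem pv_E_fst_nodup (rows : List (List (String × String))) :
    ((pvE rows).map (·.1)).Nodup := by
  simp only [List.Nodup, List.pairwise_map]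
  exact (pv_enum_pairwise rows 0).imp (fun h => Int.ne_of_lt h)

theorem pv_values_map_g_nodup (rows : List (List (String × String))) :
    ((pvBest rows).values.map gE).Nodup := by
  apply List.Nodup.map_on _ (pv_values_nodup rows)
  intro a hva b hvb hg
  obtain ⟨p, hp, rfl⟩ := List.mem_map.1 ((pv_mem_values_iff rows a).1 hva).1
  obtain ⟨q, hq, rfl⟩ := List.mem_map.1 ((pv_mem_values_iff rows b).1 hvb).1
  have : p = q := List.inj_on_of_nodup_map (pv_E_fst_nodup rows) hp hq hg
  rw [this]

theorem pv_B_eq (rows : List (List (String × String))) :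
    deduplicate_model_rows_alt rows = (dkE [] (pvSS rows)).map (fun e => e.2) := by
  show (PySem.List.sorted2
      (PySem.List.sorted (pvBest rows).values gE)
      (fun e => e.1.1) (fun e => e.1.2.1)).map (fun e => e.2)
    = (dkE [] (pvSS rows)).map (fun e => e.2)
  have hs1p : (PySem.List.sorted (pvBest rows).values gE).Pairwise (fun a b => gE a < gE b) :=
    pv_sorted_pairwise_lt _ _ (pv_values_map_g_nodup rows)
  rw [pv_sorted2_eq_sorted_lex]
  rw [show (fun (e : PvEnt) => toLex (e.1.1, e.1.2.1)) = fE from rfl]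
  rw [pv_sorted_stable _ fE gE hs1p]
  rw [show (fun (e : PvEnt) => toLex (fE e, gE e)) = muE from rfl]
  have hSApair : (dkE [] (pvSS rows)).Pairwise (fun a b => muE a < muE b) :=
    List.Pairwise.sublist (pv_dkE_sublist [] (pvSS rows)) (pv_SS_pairwise rows)
  have hSAnd : (dkE [] (pvSS rows)).Nodup :=
    hSApair.imp (fun h heq => absurd (congrArg muE heq) (ne_of_lt h))
  have hmemSA : ∀ x, x ∈ dkE [] (pvSS rows) ↔ x ∈ (pvBest rows).values := by
    intro x
    rw [pv_mem_dkE (pvSS rows) [] (pv_SS_pairwise rows) x, pv_mem_values_iff rows x]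
    simp only [pvSS, PySem.List.mem_sorted, List.not_mem_nil, not_false_iff, true_and]
  have hperm : (dkE [] (pvSS rows)).Perm (PySem.List.sorted (pvBest rows).values gE) := by
    refine List.Perm.trans ?_ (PySem.List.sorted_perm (pvBest rows).values gE false).symm
    exact (List.perm_ext_iff_of_nodup hSAnd (pv_values_nodup rows)).2 hmemSA
  rw [PySem.List.sorted_eq_of_perm_of_pairwise_lt _ _ muE hperm hSApair]

theorem deduplicate_model_rows_spec_aux : ∀ rows, deduplicate_model_rows rows = deduplicate_model_rows_alt rows := by
  intro rows
  rw [pv_A_eq, pv_B_eq]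

-- ===== VERDICT (by name: the statement is the Claim_ definition above) =====
theorem deduplicate_model_rows_spec : Claim_equal_deduplicate_model_rows := by
  intro rows _ _
  unfold Spec_deduplicate_model_rows
  exact deduplicate_model_rows_spec_aux rows
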